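-- pv_equiv track=rewrite | github.com/ruspg/city-rating-tokyo | scripts/compute-transit-times.py | estimate_transfers
-- ===== SOURCE A (Python) =====
-- def estimate_transfers(station_lines, hub_lines, line_adj):
--     """
--     Estimate minimum transfers between a station and a hub.
--     0 = direct line, 1 = one transfer, 2 = two transfers.
--     """
--     # Direct connection: station and hub share a line
--     if station_lines & hub_lines:
--         return 0
--
--     # One transfer: station line connects to a hub line via shared station
--     for sl in station_lines:
--         neighbors = line_adj.get(sl, set())
--         if neighbors & hub_lines:
--             return 1
--
--     # Two transfers: station line -> intermediate -> hub line
--     for sl in station_lines: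
--         for mid_line in line_adj.get(sl, set()):
--             mid_neighbors = line_adj.get(mid_line, set())
--             if mid_neighbors & hub_lines:
--                 return 2
--
--     return 2  # fallback
-- ===== SOURCE B (Python) =====
-- def estimate_transfers(station_lines, hub_lines, line_adj):
--     """
--     Estimate minimum transfers between a station and a hub.
--     0 = direct line, 1 = one transfer, 2 = otherwise (capped BFS).
--     """
--     frontier = set(station_lines)
--     visited = set(frontier)
--     for depth in range(2):
--         if frontier & hub_lines:
--             return depth
--         nxt = set()
--         for line in frontier:
--             nxt |= line_adj.get(line, set()) - visited
--         frontier = nxt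
--         visited |= nxt
--     return 2
-- ===== Notes on version B (the rewrite author's own statement) =====
-- stated objective: alternative
-- what changed: Replaces A's three sequential scans (direct check, one-transfer scan, redundant two-transfer double loop) with a depth-capped BFS over the line-adjacency graph using a frontier and visited set.
import Mathlib
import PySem

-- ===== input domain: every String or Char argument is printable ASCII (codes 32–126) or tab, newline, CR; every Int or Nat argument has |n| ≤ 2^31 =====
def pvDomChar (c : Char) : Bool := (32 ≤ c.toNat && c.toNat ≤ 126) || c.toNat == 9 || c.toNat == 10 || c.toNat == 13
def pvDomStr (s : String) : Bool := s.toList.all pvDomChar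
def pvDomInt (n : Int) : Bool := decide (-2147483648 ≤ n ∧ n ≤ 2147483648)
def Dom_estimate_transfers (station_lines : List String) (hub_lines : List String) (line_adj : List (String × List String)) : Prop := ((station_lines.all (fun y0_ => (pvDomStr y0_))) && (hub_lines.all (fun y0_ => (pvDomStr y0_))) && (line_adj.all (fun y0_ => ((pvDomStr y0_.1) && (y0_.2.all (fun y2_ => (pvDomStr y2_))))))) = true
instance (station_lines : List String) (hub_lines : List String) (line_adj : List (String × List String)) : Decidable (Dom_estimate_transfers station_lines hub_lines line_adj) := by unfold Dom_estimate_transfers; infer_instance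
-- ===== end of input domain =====

-- B replaces A's three sequential scans with a depth-capped BFS (frontier/visited); alternative, same cost.
-- ===== PORT A =====
def estimate_transfers (station_lines : List String) (hub_lines : List String) (line_adj : List (String × List String)) : Int :=
  let d : PySem.Dict String (List String) := PySem.Dict.mk line_adj
  -- if station_lines & hub_lines: return 0
  if !(PySem.Set.inter station_lines hub_lines).isEmpty then 0
  -- for sl in station_lines: if line_adj.get(sl, set()) & hub_lines: return 1
  else if station_lines.any (fun sl => !(PySem.Set.inter (d.getD sl []) hub_lines).isEmpty) then 1
  -- for sl in station_lines: for mid in line_adj.get(sl, set()): if line_adj.get(mid, set()) & hub_lines: return 2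
  else if station_lines.any (fun sl =>
          (d.getD sl []).any (fun mid => !(PySem.Set.inter (d.getD mid []) hub_lines).isEmpty)) then 2
  else 2

-- ===== PORT B =====
-- for depth in range(2): if frontier & hub_lines: return depth; expand frontier minus visited
def pvBfs (d : PySem.Dict String (List String)) (hub_lines : List String) :
    Nat → Int → List String → List String → Int
  | 0, _, _, _ => 2
  | fuel + 1, depth, frontier, visited =>
    if !(PySem.Set.inter frontier hub_lines).isEmpty then depth
    else
      let nxt := frontier.foldl
        (fun acc line => PySem.Set.union acc (PySem.Set.diff (d.getD line []) visited))
        PySem.Set.empty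
      pvBfs d hub_lines fuel (depth + 1) nxt (PySem.Set.union visited nxt)

def estimate_transfers_alt (station_lines : List String) (hub_lines : List String) (line_adj : List (String × List String)) : Int :=
  let d : PySem.Dict String (List String) := PySem.Dict.mk line_adj
  let frontier := PySem.Set.ofList station_lines
  pvBfs d hub_lines 2 0 frontier frontier

-- ===== PRECONDITION & SPEC =====
def Spec_estimate_transfers (station_lines : List String) (hub_lines : List String) (line_adj : List (String × List String)) (out : Int) : Prop := out = estimate_transfers_alt station_lines hub_lines line_adj
instance (station_lines : List String) (hub_lines : List String) (line_adj : List (String × List String)) (out : Int) : Decidable (Spec_estimate_transfers station_lines hub_lines line_adj out) := by unfold Spec_estimate_transfers; infer_instance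

-- ===== CLAIM (what is proved, stated in full; the proofs are below) =====
def Claim_equal_estimate_transfers : Prop := ∀ (station_lines : List String) (hub_lines : List String) (line_adj : List (String × List String)), Dom_estimate_transfers station_lines hub_lines line_adj → Spec_estimate_transfers station_lines hub_lines line_adj (estimate_transfers station_lines hub_lines line_adj)

-- ===== LEMMAS AND PROOFS =====

-- set truthiness: 's & t' is nonempty iff some element is shared
theorem pv_inter_nonempty {s t : List String} :
    (!(PySem.Set.inter s t).isEmpty) = true ↔ ∃ x ∈ s, x ∈ t := by
  rw [Bool.not_eq_eq_eq_not, Bool.not_true, List.isEmpty_eq_false_iff_exists_mem]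
  constructor
  · rintro ⟨x, hx⟩; rw [PySem.Set.mem_inter _ _ _] at hx; exact ⟨x, hx.1, hx.2⟩
  · rintro ⟨x, hx, hx'⟩; exact ⟨x, (PySem.Set.mem_inter _ _ _).mpr ⟨hx, hx'⟩⟩

-- membership in the accumulated next frontier
theorem pv_mem_nxt (d : PySem.Dict String (List String)) (visited : List String)
    (frontier : List String) (acc : List String) (x : String) :
    x ∈ frontier.foldl
      (fun acc line => PySem.Set.union acc (PySem.Set.diff (d.getD line []) visited)) acc
    ↔ x ∈ acc ∨ ∃ l ∈ frontier, x ∈ d.getD l [] ∧ x ∉ visited := by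
  induction frontier generalizing acc with
  | nil => simp
  | cons l rest ih =>
    simp only [List.foldl_cons, ih, PySem.Set.mem_union _ _ _, PySem.Set.mem_diff _ _ _,
      List.mem_cons]
    constructor
    · rintro (⟨h | h⟩ | ⟨y, hy, h⟩)
      · exact Or.inl h
      · exact Or.inr ⟨l, Or.inl rfl, h⟩
      · exact Or.inr ⟨y, Or.inr hy, h⟩
    · rintro (h | ⟨y, (rfl | hy), h⟩)
      · exact Or.inl (Or.inl h)
      · exact Or.inl (Or.inr h)
      · exact Or.inr ⟨y, hy, h⟩

theorem estimate_transfers_eq (station_lines : List String) (hub_lines : List String)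
    (line_adj : List (String × List String)) :
    estimate_transfers station_lines hub_lines line_adj
      = estimate_transfers_alt station_lines hub_lines line_adj := by
  unfold estimate_transfers estimate_transfers_alt pvBfs
  set d : PySem.Dict String (List String) := PySem.Dict.mk line_adj
  by_cases h0 : ∃ x ∈ station_lines, x ∈ hub_lines
  · have hS : (!(PySem.Set.inter station_lines hub_lines).isEmpty) = true :=
      pv_inter_nonempty.mpr h0
    have hF : (!(PySem.Set.inter (PySem.Set.ofList station_lines) hub_lines).isEmpty) = true := by
      rw [pv_inter_nonempty]
      obtain ⟨x, hx, hx'⟩ := h0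
      exact ⟨x, (PySem.Set.mem_ofList _ _).mpr hx, hx'⟩
    simp [hS, hF]
  · have hS : (!(PySem.Set.inter station_lines hub_lines).isEmpty) = false := by
      rw [Bool.eq_false_iff, Ne, pv_inter_nonempty]; exact h0
    have hF : (!(PySem.Set.inter (PySem.Set.ofList station_lines) hub_lines).isEmpty) = false := by
      rw [Bool.eq_false_iff, Ne, pv_inter_nonempty]
      rintro ⟨x, hx, hx'⟩
      exact h0 ⟨x, (PySem.Set.mem_ofList _ _).mp hx, hx'⟩
    simp only [hS, hF, Bool.false_eq_true, if_false]
    unfold pvBfs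
    by_cases h1 : ∃ sl ∈ station_lines, ∃ n ∈ d.getD sl [], n ∈ hub_lines
    · have hA : station_lines.any
          (fun sl => !(PySem.Set.inter (d.getD sl []) hub_lines).isEmpty) = true := by
        rw [List.any_eq_true]
        obtain ⟨sl, hsl, n, hn, hn'⟩ := h1
        exact ⟨sl, hsl, pv_inter_nonempty.mpr ⟨n, hn, hn'⟩⟩
      have hB : (!(PySem.Set.inter
          ((PySem.Set.ofList station_lines).foldl
            (fun acc line => PySem.Set.union acc
              (PySem.Set.diff (d.getD line []) (PySem.Set.ofList station_lines)))
            PySem.Set.empty) hub_lines).isEmpty) = true := by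
        rw [pv_inter_nonempty]
        obtain ⟨sl, hsl, n, hn, hn'⟩ := h1
        refine ⟨n, (pv_mem_nxt _ _ _ _ _).mpr (Or.inr ⟨sl, (PySem.Set.mem_ofList _ _).mpr hsl, hn, ?_⟩), hn'⟩
        rw [PySem.Set.mem_ofList _ _]
        intro hnS
        exact h0 ⟨n, hnS, hn'⟩
      simp only [hA, if_true]
      rw [if_pos hB]
      norm_num
    · have hA : station_lines.any
          (fun sl => !(PySem.Set.inter (d.getD sl []) hub_lines).isEmpty) = false := by
        rw [Bool.eq_false_iff, Ne, List.any_eq_true]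
        rintro ⟨sl, hsl, hx⟩
        rw [pv_inter_nonempty] at hx
        obtain ⟨n, hn, hn'⟩ := hx
        exact h1 ⟨sl, hsl, n, hn, hn'⟩
      have hB : (!(PySem.Set.inter
          ((PySem.Set.ofList station_lines).foldl
            (fun acc line => PySem.Set.union acc
              (PySem.Set.diff (d.getD line []) (PySem.Set.ofList station_lines)))
            PySem.Set.empty) hub_lines).isEmpty) = false := by
        rw [Bool.eq_false_iff, Ne, pv_inter_nonempty]
        rintro ⟨n, hn, hn'⟩
        rcases (pv_mem_nxt _ _ _ _ _).mp hn with h | ⟨l, hl, hnl, _⟩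
        · simp [PySem.Set.empty] at h
        · exact h1 ⟨l, (PySem.Set.mem_ofList _ _).mp hl, n, hnl, hn'⟩
      simp only [hA, hB, Bool.false_eq_true, if_false]
      unfold pvBfs
      split <;> rfl

-- ===== VERDICT (by name: the statement is the Claim_ definition above) =====
theorem estimate_transfers_spec : Claim_equal_estimate_transfers := by
  intro S H adj _
  unfold Spec_estimate_transfers
  exact estimate_transfers_eq S H adj
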